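-- pv_equiv track=rewrite | github.com/fkeldh2089/TIL | algorithm/BOJ/20058_마법사상어와파이어스톰/20058_1.py | tornado
-- ===== SOURCE A (Python) =====
-- def tornado(field, N, Q):  # field 에서 2^Q 의 격자크기로 회전
--     cnt = N - Q  # 반복 횟수
--     op = 2**cnt
--     for p1 in range(op):
--         for p2 in range(op):
--             tmp_mat = [field[p3][p2*2**Q:(p2+1)*2**Q] for p3 in range(p1*2**Q, (p1+1)*2**Q)]
--             tmp_mat = list(map(list, zip(*tmp_mat[::-1])))  # 90도 회전
--             for r in range(2**Q):
--                 field[p1*2**Q + r][p2*2**Q:(p2+1)*2**Q] = tmp_mat[r]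
--
--         # else:  # 홀수 row 이면
--         #     for p2 in range(1, op, 2):
--         #         tmp_mat = [field[p3][p2*2**Q:(p2+1)*2**Q] for p3 in range(p1*2**Q, (p1+1)*2**Q)]
--         #         tmp_mat = list(map(list, zip(*tmp_mat[::-1])))  # 90도 회전
--         #         for r in range(2**Q):
--         #             field[p1*2**Q + r][p2*2**Q:(p2+1)*2**Q] = tmp_mat[r]
--     return field
-- ===== SOURCE B (Python) =====
-- def tornado(field, N, Q):
--     s = 2 ** Q
--     n = 2 ** (N - Q) * s
--     res = [[field[(i // s) * s + (s - 1 - j % s)][(j // s) * s + i % s] for j in range(n)]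
--            for i in range(n)]
--     for i in range(n):
--         field[i][:n] = res[i]
--     return field
-- ===== Notes on version B (the rewrite author's own statement) =====
-- stated objective: simpler
-- what changed: Replaces the per-block slice-extraction + reversed zip-transpose + slice re-assignment with one comprehension that builds the whole rotated region via the direct coordinate map res[i][j] = field[(i//s)*s + s-1-j%s][(j//s)*s + i%s], written back row by row with a prefix slice assignment.
import Mathlib
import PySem

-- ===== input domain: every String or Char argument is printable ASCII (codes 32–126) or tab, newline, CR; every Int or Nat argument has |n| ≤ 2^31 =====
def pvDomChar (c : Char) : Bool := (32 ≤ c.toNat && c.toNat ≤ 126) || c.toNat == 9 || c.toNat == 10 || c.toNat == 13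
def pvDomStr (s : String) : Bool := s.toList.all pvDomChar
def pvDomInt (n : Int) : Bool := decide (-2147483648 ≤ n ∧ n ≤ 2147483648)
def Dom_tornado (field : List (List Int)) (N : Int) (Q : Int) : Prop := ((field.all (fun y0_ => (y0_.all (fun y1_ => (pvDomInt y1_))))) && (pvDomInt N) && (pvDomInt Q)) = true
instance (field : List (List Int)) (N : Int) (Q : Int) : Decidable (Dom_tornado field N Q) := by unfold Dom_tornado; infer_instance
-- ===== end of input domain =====

-- B rebuilds the rotated grid with one comprehension and a direct coordinate map instead of
-- A's per-block slice extraction + reversed zip-transpose + slice re-assignment (objective: simpler).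
-- Both Pythons mutate `field` in place; the equivalence proved here is about the RETURN value only.

-- ===== PORT A =====

-- hand port of Python's zip(*rows) (then list(map(list, ·))): rows truncated to the shortest row;
-- exact: zip(*[]) = [] and for nonempty rows every index j is below every row's length.
def pyZipStar (rows : List (List Int)) : List (List Int) :=
  (List.range (((rows.map List.length).min?).getD 0)).map
    (fun j => rows.map (fun r => r.getD j 0))

-- hand port of Python's slice assignment fld[i][a:b] = v (0 ≤ a ≤ b, 0 ≤ i, as produced by A's
-- loops): the row becomes row[:a] ++ v ++ row[b:]; exact there (Pre_ keeps i in range).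
def setRowSlice (fld : List (List Int)) (i a b : Int) (v : List Int) : List (List Int) :=
  fld.set i.toNat
    (PySem.List.slice (fld.getD i.toNat []) none (some a) ++ v ++
     PySem.List.slice (fld.getD i.toNat []) (some b) none)

def tornado (field : List (List Int)) (N : Int) (Q : Int) : List (List Int) :=
  let cnt := N - Q
  let op : Int := 2 ^ cnt.toNat       -- Python 2**cnt; cnt ≥ 0 under Pre_
  (PySem.List.pyRange 0 op 1).foldl (fun fld p1 =>
    (PySem.List.pyRange 0 op 1).foldl (fun fld p2 =>
      let s : Int := 2 ^ Q.toNat      -- Python 2**Q; Q ≥ 0 under Pre_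
      let tmp1 := (PySem.List.pyRange (p1 * s) ((p1 + 1) * s) 1).map
        (fun p3 => PySem.List.slice (PySem.List.pyGetD fld p3 []) (some (p2 * s)) (some ((p2 + 1) * s)))
      let tmp := pyZipStar tmp1.reverse
      (PySem.List.pyRange 0 s 1).foldl (fun fld r =>
        setRowSlice fld (p1 * s + r) (p2 * s) ((p2 + 1) * s) (PySem.List.pyGetD tmp r [])) fld)
      fld) field

-- ===== PORT B =====

-- hand port of Python's prefix slice assignment fld[i][:n] = v (0 ≤ i, 0 ≤ n, as produced by
-- B's loop): the row becomes v ++ row[n:]; exact there (Pre_ keeps i in range).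
def setRowPrefix (fld : List (List Int)) (i n : Int) (v : List Int) : List (List Int) :=
  fld.set i.toNat (v ++ PySem.List.slice (fld.getD i.toNat []) (some n) none)

def tornado_alt (field : List (List Int)) (N : Int) (Q : Int) : List (List Int) :=
  let s : Int := 2 ^ Q.toNat
  let n : Int := 2 ^ (N - Q).toNat * s
  let res := (PySem.List.pyRange 0 n 1).map (fun i =>
    (PySem.List.pyRange 0 n 1).map (fun j =>
      PySem.List.pyGetD
        (PySem.List.pyGetD field (PySem.Int.floordiv i s * s + (s - 1 - PySem.Int.mod j s)) [])
        (PySem.Int.floordiv j s * s + PySem.Int.mod i s) 0))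
  (PySem.List.pyRange 0 n 1).foldl (fun fld i =>
    setRowPrefix fld i n (PySem.List.pyGetD res i [])) field

-- ===== PRECONDITION & SPEC =====
-- Pre_ is exactly the set of inputs on which the Python A returns normally: 0 ≤ Q ≤ N and each of
-- the first 2^N rows exists and has at least 2^N entries — otherwise A raises (TypeError from a
-- float power when Q < 0 or N < Q, IndexError from a missing row or a zip-truncated short row).
-- Rows after the first 2^N and entries after column 2^N pass through both programs untouched.
-- (2^N ≤ length is phrased through Nat.log, and the take is capped by the log, so the Decidable
-- instance never computes 2^N for a huge N.)
def Pre_tornado (field : List (List Int)) (N : Int) (Q : Int) : Prop :=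
  0 ≤ Q ∧ Q ≤ N ∧ field ≠ [] ∧ N.toNat ≤ Nat.log 2 field.length ∧
  ∀ row ∈ field.take (2 ^ min N.toNat (Nat.log 2 field.length)),
    row ≠ [] ∧ N.toNat ≤ Nat.log 2 row.length

instance (field : List (List Int)) (N : Int) (Q : Int) : Decidable (Pre_tornado field N Q) := by
  unfold Pre_tornado; infer_instance

def pvWitness_tornado : List (List Int) × Int × Int := ([[1, 2], [3, 4]], 1, 1)

def Spec_tornado (field : List (List Int)) (N : Int) (Q : Int) (out : List (List Int)) : Prop := out = tornado_alt field N Q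
instance (field : List (List Int)) (N : Int) (Q : Int) (out : List (List Int)) : Decidable (Spec_tornado field N Q out) := by unfold Spec_tornado; infer_instance

-- ===== CLAIM (what is proved, stated in full; the proofs are below) =====
def Claim_equal_tornado : Prop := ∀ (field : List (List Int)) (N : Int) (Q : Int), Dom_tornado field N Q → Pre_tornado field N Q → Spec_tornado field N Q (tornado field N Q)

-- ===== LEMMAS AND PROOFS =====

-- proof-side matrix view: entry (i, j) of a list-of-rows grid (0 default)
def matG (g : List (List Int)) (i j : Nat) : Int := (g.getD i []).getD j 0

-- proof-side shape predicate: same row count and the same length row by row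
def SameShape (g h : List (List Int)) : Prop :=
  g.length = h.length ∧ ∀ k, (g.getD k []).length = (h.getD k []).length

lemma SameShape_refl (g : List (List Int)) : SameShape g g := ⟨rfl, fun _ => rfl⟩

lemma SameShape_trans {g h k : List (List Int)} (h1 : SameShape g h) (h2 : SameShape h k) :
    SameShape g k := ⟨h1.1.trans h2.1, fun i => (h1.2 i).trans (h2.2 i)⟩

lemma SameShape_symm {g h : List (List Int)} (h1 : SameShape g h) : SameShape h g :=
  ⟨h1.1.symm, fun i => (h1.2 i).symm⟩

-- the 90°-clockwise block rotation as a coordinate map (block size s)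
def rotC (field : List (List Int)) (s i j : Nat) : Int :=
  matG field (i / s * s + (s - 1 - j % s)) (j / s * s + i % s)

-- the body of A's p2-loop, as a named function
def stepA (s : Int) (fld : List (List Int)) (p1 p2 : Int) : List (List Int) :=
  let tmp1 := (PySem.List.pyRange (p1 * s) ((p1 + 1) * s) 1).map
    (fun p3 => PySem.List.slice (PySem.List.pyGetD fld p3 []) (some (p2 * s)) (some ((p2 + 1) * s)))
  let tmp := pyZipStar tmp1.reverse
  (PySem.List.pyRange 0 s 1).foldl (fun fld r =>
    setRowSlice fld (p1 * s + r) (p2 * s) ((p2 + 1) * s) (PySem.List.pyGetD tmp r [])) fld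

lemma tornado_eq (field : List (List Int)) (N Q : Int) :
    tornado field N Q = (List.range (2 ^ (N - Q).toNat)).foldl (fun fld (P : Nat) =>
      (List.range (2 ^ (N - Q).toNat)).foldl
        (fun fld (K : Nat) => stepA (2 ^ Q.toNat : Int) fld (P : Int) (K : Int)) fld) field := by
  conv_lhs => simp only [tornado,
    show ((2 : Int) ^ (N - Q).toNat) = ((2 ^ (N - Q).toNat : Nat) : Int) by push_cast; ring,
    show ((2 : Int) ^ Q.toNat) = ((2 ^ Q.toNat : Nat) : Int) by push_cast; ring,
    PySem.List.pyRange_zero_nat, List.foldl_map]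
  simp only [stepA, show ((2 : Int) ^ Q.toNat) = ((2 ^ Q.toNat : Nat) : Int) by push_cast; ring,
    PySem.List.pyRange_zero_nat, List.foldl_map]

lemma getD_map_range {A : Type} (F : Nat → A) (d : A) (s r : Nat) (hr : r < s) :
    ((List.range s).map F).getD r d = F r := by
  rw [List.getD_eq_getElem _ _ (by rw [List.length_map, List.length_range]; exact hr)]
  rw [List.getElem_map, List.getElem_range]

lemma getD_map' {A B : Type} (f : A → B) (l : List A) (d : B) (d0 : A) (c : Nat)
    (hc : c < l.length) : (l.map f).getD c d = f (l.getD c d0) := by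
  rw [List.getD_eq_getElem _ _ (by rw [List.length_map]; exact hc),
    List.getElem_map, List.getD_eq_getElem _ _ hc]

lemma setRowSlice_spec (g : List (List Int)) (i a s' : Nat) (v : List Int)
    (hi : i < g.length) (hv : v.length = s') (has : a + s' ≤ (g.getD i []).length) :
    SameShape (setRowSlice g (i : Int) (a : Int) ((a + s' : Nat) : Int) v) g ∧
    ∀ i' j,
      matG (setRowSlice g (i : Int) (a : Int) ((a + s' : Nat) : Int) v) i' j =
        if i' = i ∧ a ≤ j ∧ j < a + s' then v.getD (j - a) 0 else matG g i' j := by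
  have hset : setRowSlice g (i : Int) (a : Int) ((a + s' : Nat) : Int) v
      = g.set i ((g.getD i []).take a ++ v ++ (g.getD i []).drop (a + s')) := by
    unfold setRowSlice
    rw [Int.toNat_natCast, PySem.List.slice_to_natCast, PySem.List.slice_from_natCast]
  rw [hset]
  generalize hrowg : g.getD i [] = row at has
  have hRlen : (row.take a ++ v ++ row.drop (a + s')).length = row.length := by
    rw [List.length_append, List.length_append, List.length_take, List.length_drop, hv]
    omega
  have hRget : ∀ j, (row.take a ++ v ++ row.drop (a + s')).getD j 0 =
      if a ≤ j ∧ j < a + s' then v.getD (j - a) 0 else row.getD j 0 := by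
    intro j
    rw [List.append_assoc]
    rcases lt_or_ge j a with hja | hja
    · rw [List.getD_append _ _ _ _ (by rw [List.length_take]; omega), if_neg (by omega)]
      rw [List.getD_eq_getElem _ _ (by rw [List.length_take]; omega),
        List.getD_eq_getElem _ _ (by omega)]
      exact List.getElem_take
    · rw [List.getD_append_right _ _ _ _ (by rw [List.length_take]; omega), List.length_take,
        min_eq_left (by omega)]
      rcases lt_or_ge j (a + s') with hjs | hjs
      · rw [List.getD_append _ _ _ _ (by omega), if_pos (by omega)]
      · rw [List.getD_append_right _ _ _ _ (by omega), if_neg (by omega), hv]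
        rcases lt_or_ge j row.length with hjl | hjl
        · rw [List.getD_eq_getElem _ _ (by rw [List.length_drop]; omega),
            List.getD_eq_getElem _ _ (by omega)]
          rw [List.getElem_drop]
          congr 1
          omega
        · rw [List.getD_eq_default _ _ (by rw [List.length_drop]; omega),
            List.getD_eq_default _ _ (by omega)]
  constructor
  · constructor
    · rw [List.length_set]
    · intro k
      by_cases hki : k = i
      · subst hki
        rw [List.getD_eq_getElem _ _ (by rw [List.length_set]; omega), List.getElem_set_self,
          hRlen, hrowg]
      · by_cases hkl : k < g.length
        · rw [List.getD_eq_getElem _ _ (by rw [List.length_set]; omega),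
            List.getElem_set_ne (fun h => hki h.symm), List.getD_eq_getElem _ _ hkl]
        · rw [List.getD_eq_default _ _ (by rw [List.length_set]; omega),
            List.getD_eq_default _ _ (by omega)]
  · intro i' j
    unfold matG
    by_cases hii : i' = i
    · have hx : (g.set i (row.take a ++ v ++ row.drop (a + s'))).getD i' []
          = row.take a ++ v ++ row.drop (a + s') := by
        simp only [hii]
        rw [List.getD_eq_getElem _ _ (by rw [List.length_set]; omega), List.getElem_set_self]
      rw [hx, hRget j]
      split_ifs with h1 h2 h2 <;> first | rfl | tauto | (rw [hii, hrowg])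
    · by_cases hkl : i' < g.length
      · have hx : (g.set i (row.take a ++ v ++ row.drop (a + s'))).getD i' []
            = g.getD i' [] := by
          rw [List.getD_eq_getElem _ _ (by rw [List.length_set]; omega),
            List.getElem_set_ne (fun h => hii h.symm), List.getD_eq_getElem _ _ hkl]
        rw [hx, if_neg (by tauto)]
      · have hx : (g.set i (row.take a ++ v ++ row.drop (a + s'))).getD i' []
            = ([] : List Int) := List.getD_eq_default _ _ (by rw [List.length_set]; omega)
        have hy : g.getD i' [] = ([] : List Int) := List.getD_eq_default _ _ (by omega)
        rw [hx, hy, if_neg (by tauto)]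

lemma min?_replicate (k s : Nat) : (List.replicate (k + 1) s).min? = some s := by
  rw [List.replicate_succ, List.min?_cons]
  cases k with
  | zero => rfl
  | succ k => rw [min?_replicate k s]; simp [min_self]

lemma pyZipStar_spec (rows : List (List Int)) (s : Nat) (hs : 0 < s)
    (hlen : rows.length = s) (hrows : ∀ r ∈ rows, r.length = s) :
    pyZipStar rows = (List.range s).map (fun j => rows.map (fun r => r.getD j 0)) := by
  unfold pyZipStar
  have hrep : rows.map List.length = List.replicate s s := by
    rw [List.eq_replicate_iff]
    refine ⟨by simp [hlen], ?_⟩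
    intro b hb
    simp only [List.mem_map] at hb
    obtain ⟨r, hr, rfl⟩ := hb
    exact hrows r hr
  obtain ⟨k, rfl⟩ : ∃ k, s = k + 1 := ⟨s - 1, by omega⟩
  rw [hrep, min?_replicate]
  rfl

lemma tmp_spec (g : List (List Int)) (s base a : Nat) (hs : 0 < s)
    (hrlen : ∀ k, k < s → a + s ≤ (g.getD (base + k) []).length) :
    (pyZipStar (((List.range s).map (fun k =>
        ((g.getD (base + k) []).drop a).take s)).reverse)).length = s ∧
    (∀ row ∈ pyZipStar (((List.range s).map (fun k =>
        ((g.getD (base + k) []).drop a).take s)).reverse), row.length = s) ∧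
    ∀ r c, r < s → c < s →
      matG (pyZipStar (((List.range s).map (fun k =>
        ((g.getD (base + k) []).drop a).take s)).reverse)) r c
        = matG g (base + (s - 1 - c)) (a + r) := by
  have hflen : ∀ k, k < s → (((g.getD (base + k) []).drop a).take s).length = s := by
    intro k hk
    rw [List.length_take, List.length_drop]
    have := hrlen k hk
    omega
  have hz := pyZipStar_spec (((List.range s).map (fun k =>
      ((g.getD (base + k) []).drop a).take s)).reverse) s hs (by simp)
    (by
      intro r hr
      rw [List.mem_reverse, List.mem_map] at hr
      obtain ⟨k, hk, rfl⟩ := hr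
      rw [List.mem_range] at hk
      exact hflen k hk)
  rw [hz]
  refine ⟨by simp, ?_, ?_⟩
  · intro row hrow
    rw [List.mem_map] at hrow
    obtain ⟨j, hj, rfl⟩ := hrow
    simp
  · intro r c hr hc
    unfold matG
    rw [getD_map_range _ _ s r hr]
    rw [getD_map' _ _ _ ([] : List Int) c
      (by rw [List.length_reverse, List.length_map, List.length_range]; exact hc)]
    have hsc : s - 1 - c < s := by omega
    have hcl : c < (((List.range s).map (fun k =>
        ((g.getD (base + k) []).drop a).take s)).reverse).length := by
      rw [List.length_reverse, List.length_map, List.length_range]; exact hc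
    have h3 : (((List.range s).map (fun k =>
        ((g.getD (base + k) []).drop a).take s)).reverse).getD c []
        = ((g.getD (base + (s - 1 - c)) []).drop a).take s := by
      rw [List.getD_eq_getElem _ _ hcl, List.getElem_reverse]
      simp only [List.length_map, List.length_range]
      rw [List.getElem_map, List.getElem_range]
    rw [h3]
    have hb1 : r < (((g.getD (base + (s - 1 - c)) []).drop a).take s).length := by
      rw [hflen _ hsc]; exact hr
    have hb2 : a + r < (g.getD (base + (s - 1 - c)) []).length := by
      have := hrlen _ hsc; omega
    rw [List.getD_eq_getElem _ _ hb1, List.getD_eq_getElem _ _ hb2, List.getElem_take,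
      List.getElem_drop]

lemma writeback_fold (tmp : List (List Int)) (s base a : Nat)
    (htl : tmp.length = s) (htr : ∀ row ∈ tmp, row.length = s) :
    ∀ (k : Nat), k ≤ s → ∀ (g : List (List Int)),
      base + s ≤ g.length →
      (∀ r, r < s → a + s ≤ (g.getD (base + r) []).length) →
      SameShape ((List.range k).foldl (fun fld (r : Nat) =>
        setRowSlice fld ((base : Int) + (r : Int)) (a : Int) ((a + s : Nat) : Int)
          (PySem.List.pyGetD tmp (r : Int) [])) g) g ∧
      ∀ i j,
        matG ((List.range k).foldl (fun fld (r : Nat) =>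
          setRowSlice fld ((base : Int) + (r : Int)) (a : Int) ((a + s : Nat) : Int)
            (PySem.List.pyGetD tmp (r : Int) [])) g) i j =
          if base ≤ i ∧ i < base + k ∧ a ≤ j ∧ j < a + s
            then matG tmp (i - base) (j - a) else matG g i j := by
  intro k
  induction k with
  | zero =>
    intro _ g _ _
    refine ⟨SameShape_refl g, ?_⟩
    intro i j
    rw [if_neg (by omega)]
    rfl
  | succ k ih =>
    intro hk g hgl hgr
    rw [List.range_succ, List.foldl_append, List.foldl_cons, List.foldl_nil]
    obtain ⟨ihs, ihm⟩ := ih (by omega) g hgl hgr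
    have hvk : tmp.getD k [] ∈ tmp := by
      rw [List.getD_eq_getElem _ _ (by omega)]
      exact List.getElem_mem _
    have hcast : ((base : Int) + (k : Int)) = ((base + k : Nat) : Int) := by push_cast; ring
    rw [hcast, PySem.List.pyGetD_natCast]
    obtain ⟨sps, spm⟩ := setRowSlice_spec _ (base + k) a s (tmp.getD k [])
      (by rw [ihs.1]; omega) (htr _ hvk) (by rw [ihs.2 (base + k)]; exact hgr k (by omega))
    refine ⟨SameShape_trans sps ihs, ?_⟩
    intro i j
    rw [spm i j]
    by_cases hib : i = base + k ∧ a ≤ j ∧ j < a + s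
    · obtain ⟨hieq, hja, hjs⟩ := hib
      rw [if_pos ⟨hieq, hja, hjs⟩, if_pos (by omega)]
      unfold matG
      rw [hieq]
      have hbk : base + k - base = k := by omega
      rw [hbk]
    · rw [if_neg hib, ihm i j]
      by_cases hold : base ≤ i ∧ i < base + k ∧ a ≤ j ∧ j < a + s
      · rw [if_pos hold, if_pos (by omega)]
      · rw [if_neg hold, if_neg (by omega)]

lemma stepA_spec (g : List (List Int)) (s : Nat) (P K : Nat) (hs : 0 < s)
    (hP : P * s + s ≤ g.length)
    (hKrows : ∀ r, r < s → K * s + s ≤ (g.getD (P * s + r) []).length) :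
    SameShape (stepA (s : Int) g (P : Int) (K : Int)) g ∧
    ∀ i j,
      matG (stepA (s : Int) g (P : Int) (K : Int)) i j =
        if P * s ≤ i ∧ i < P * s + s ∧ K * s ≤ j ∧ j < K * s + s
          then matG g (P * s + (s - 1 - (j - K * s))) (K * s + (i - P * s))
          else matG g i j := by
  have e1 : ((P : Int) * (s : Int)) = ((P * s : Nat) : Int) := by push_cast; ring
  have e2 : (((P : Int) + 1) * (s : Int)) = ((P * s + s : Nat) : Int) := by push_cast; ring
  have e3 : ((K : Int) * (s : Int)) = ((K * s : Nat) : Int) := by push_cast; ring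
  have e4 : (((K : Int) + 1) * (s : Int)) = ((K * s + s : Nat) : Int) := by push_cast; ring
  have e5 : ∀ k : Nat, ((P * s : Nat) : Int) + (k : Int) = ((P * s + k : Nat) : Int) := by
    intro k; push_cast; ring
  have et : (((P * s + s : Nat) : Int) - ((P * s : Nat) : Int)).toNat = s := by omega
  have ets : K * s + s - K * s = s := by omega
  have hstep : stepA (s : Int) g (P : Int) (K : Int) =
      (List.range s).foldl (fun fld (r : Nat) =>
        setRowSlice fld (((P * s : Nat) : Int) + (r : Int)) ((K * s : Nat) : Int)
          ((K * s + s : Nat) : Int)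
          (PySem.List.pyGetD (pyZipStar (((List.range s).map (fun k =>
            ((g.getD (P * s + k) []).drop (K * s)).take s)).reverse)) (r : Int) [])) g := by
    simp only [stepA, e1, e2, e3, e4, PySem.List.pyRange_one, et, zero_add, sub_zero,
      Int.toNat_natCast, List.foldl_map, List.map_map, Function.comp_def, e5,
      PySem.List.pyGetD_natCast, PySem.List.slice_natCast, ets]
  obtain ⟨t1, t2, t3⟩ := tmp_spec g s (P * s) (K * s) hs hKrows
  have wb := writeback_fold (pyZipStar (((List.range s).map (fun k =>
      ((g.getD (P * s + k) []).drop (K * s)).take s)).reverse)) s (P * s) (K * s)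
    t1 t2 s le_rfl g hP hKrows
  rw [hstep]
  refine ⟨wb.1, ?_⟩
  intro i j
  rw [wb.2 i j]
  by_cases hb : P * s ≤ i ∧ i < P * s + s ∧ K * s ≤ j ∧ j < K * s + s
  · rw [if_pos hb, if_pos hb, t3 (i - P * s) (j - K * s) (by omega) (by omega)]
  · rw [if_neg hb, if_neg hb]

-- loop invariant after A has processed block rows < P completely and, in block row P, blocks < K
def InvQ (field g : List (List Int)) (n s P K : Nat) : Prop :=
  SameShape g field ∧ ∀ i j,
    matG g i j = if (i < P * s ∧ j < n) ∨ (i < (P + 1) * s ∧ j < K * s)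
      then rotC field s i j else matG field i j

lemma div_mod_block (s P i : Nat) (h1 : P * s ≤ i) (h2 : i < P * s + s) :
    i / s = P ∧ i % s = i - P * s := by
  have hs : 0 < s := by omega
  have hi : i = (i - P * s) + P * s := by omega
  constructor
  · rw [hi, Nat.add_mul_div_right _ _ hs, Nat.div_eq_of_lt (by omega)]
    omega
  · rw [hi, Nat.add_mul_mod_self_right, Nat.mod_eq_of_lt (by omega)]
    omega

lemma inner_step (field g : List (List Int)) (n s P K : Nat) (hs : 0 < s)
    (hnL : n ≤ field.length) (hrowf : ∀ k, k < n → n ≤ (field.getD k []).length)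
    (hinv : InvQ field g n s P K) (hP : (P + 1) * s ≤ n) (hK : (K + 1) * s ≤ n) :
    InvQ field (stepA (s : Int) g (P : Int) (K : Int)) n s P (K + 1) := by
  obtain ⟨hgs, hgm⟩ := hinv
  have hps : (P + 1) * s = P * s + s := by ring
  have hks : (K + 1) * s = K * s + s := by ring
  have hP' : P * s + s ≤ g.length := by rw [hgs.1]; omega
  have hKrows : ∀ r, r < s → K * s + s ≤ (g.getD (P * s + r) []).length := by
    intro r hr
    rw [hgs.2 (P * s + r)]
    have := hrowf (P * s + r) (by omega)
    omega
  obtain ⟨sps, spm⟩ := stepA_spec g s P K hs hP' hKrows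
  refine ⟨SameShape_trans sps hgs, ?_⟩
  intro i j
  rw [spm i j]
  by_cases hb : P * s ≤ i ∧ i < P * s + s ∧ K * s ≤ j ∧ j < K * s + s
  · obtain ⟨hdi, hmi⟩ := div_mod_block s P i (by omega) (by omega)
    obtain ⟨hdj, hmj⟩ := div_mod_block s K j (by omega) (by omega)
    rw [if_pos hb, hgm (P * s + (s - 1 - (j - K * s))) (K * s + (i - P * s)),
      if_neg (by omega), if_pos (by omega)]
    unfold rotC
    rw [hdi, hmi, hdj, hmj]
  · rw [if_neg hb, hgm i j]
    by_cases hold : (i < P * s ∧ j < n) ∨ (i < (P + 1) * s ∧ j < K * s)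
    · rw [if_pos hold, if_pos (by omega)]
    · rw [if_neg hold, if_neg (by omega)]

lemma inner_fold (field : List (List Int)) (n s b P : Nat) (hs : 0 < s) (hn : n = b * s)
    (hnL : n ≤ field.length) (hrowf : ∀ k, k < n → n ≤ (field.getD k []).length)
    (hP : (P + 1) * s ≤ n) :
    ∀ (K : Nat), K ≤ b → ∀ (g : List (List Int)), InvQ field g n s P 0 →
      InvQ field ((List.range K).foldl
        (fun fld (k : Nat) => stepA (s : Int) fld (P : Int) (k : Int)) g) n s P K := by
  intro K
  induction K with
  | zero => intro _ g hg; simpa using hg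
  | succ K ih =>
    intro hK g hg
    rw [List.range_succ, List.foldl_append, List.foldl_cons, List.foldl_nil]
    exact inner_step field _ n s P K hs hnL hrowf (ih (by omega) g hg) hP
      (by rw [hn]; exact Nat.mul_le_mul_right s hK)

lemma outer_fold (field : List (List Int)) (n s b : Nat) (hs : 0 < s) (hn : n = b * s)
    (hnL : n ≤ field.length) (hrowf : ∀ k, k < n → n ≤ (field.getD k []).length) :
    ∀ (P : Nat), P ≤ b → ∀ (g : List (List Int)), InvQ field g n s 0 0 →
      InvQ field ((List.range P).foldl (fun fld (p : Nat) =>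
        (List.range b).foldl (fun fld (k : Nat) => stepA (s : Int) fld (p : Int) (k : Int)) fld) g)
        n s P 0 := by
  intro P
  induction P with
  | zero => intro _ g hg; simpa using hg
  | succ P ih =>
    intro hP g hg
    rw [List.range_succ, List.foldl_append, List.foldl_cons, List.foldl_nil]
    have hinv := ih (by omega) g hg
    have hPs : (P + 1) * s ≤ n := by rw [hn]; exact Nat.mul_le_mul_right s hP
    have hb := inner_fold field n s b P hs hn hnL hrowf hPs b le_rfl _ hinv
    obtain ⟨hbs, hbm⟩ := hb
    refine ⟨hbs, ?_⟩
    intro i j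
    have er1 : (P + 1) * s = P * s + s := by ring
    have er2 : (P + 1 + 1) * s = P * s + s + s := by ring
    rw [hbm i j]
    by_cases hc : (i < P * s ∧ j < n) ∨ (i < (P + 1) * s ∧ j < b * s)
    · rw [if_pos hc, if_pos (by omega)]
    · rw [if_neg hc, if_neg (by omega)]

lemma setRowPrefix_spec (g : List (List Int)) (i n' : Nat) (v : List Int)
    (hi : i < g.length) (hv : v.length = n') (hrl : n' ≤ (g.getD i []).length) :
    SameShape (setRowPrefix g (i : Int) (n' : Int) v) g ∧
    ∀ i' j,
      matG (setRowPrefix g (i : Int) (n' : Int) v) i' j =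
        if i' = i ∧ j < n' then v.getD j 0 else matG g i' j := by
  have hset : setRowPrefix g (i : Int) (n' : Int) v
      = g.set i (v ++ (g.getD i []).drop n') := by
    unfold setRowPrefix
    rw [Int.toNat_natCast, PySem.List.slice_from_natCast]
  rw [hset]
  generalize hrowg : g.getD i [] = row at hrl
  have hRlen : (v ++ row.drop n').length = row.length := by
    rw [List.length_append, List.length_drop, hv]
    omega
  have hRget : ∀ j, (v ++ row.drop n').getD j 0 =
      if j < n' then v.getD j 0 else row.getD j 0 := by
    intro j
    rcases lt_or_ge j n' with hjn | hjn
    · rw [List.getD_append _ _ _ _ (by omega), if_pos hjn]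
    · rw [List.getD_append_right _ _ _ _ (by omega), if_neg (by omega), hv]
      rcases lt_or_ge j row.length with hjl | hjl
      · rw [List.getD_eq_getElem _ _ (by rw [List.length_drop]; omega),
          List.getD_eq_getElem _ _ (by omega)]
        rw [List.getElem_drop]
        congr 1
        omega
      · rw [List.getD_eq_default _ _ (by rw [List.length_drop]; omega),
          List.getD_eq_default _ _ (by omega)]
  constructor
  · constructor
    · rw [List.length_set]
    · intro k
      by_cases hki : k = i
      · subst hki
        rw [List.getD_eq_getElem _ _ (by rw [List.length_set]; omega), List.getElem_set_self,
          hRlen, hrowg]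
      · by_cases hkl : k < g.length
        · rw [List.getD_eq_getElem _ _ (by rw [List.length_set]; omega),
            List.getElem_set_ne (fun h => hki h.symm), List.getD_eq_getElem _ _ hkl]
        · rw [List.getD_eq_default _ _ (by rw [List.length_set]; omega),
            List.getD_eq_default _ _ (by omega)]
  · intro i' j
    unfold matG
    by_cases hii : i' = i
    · have hx : (g.set i (v ++ row.drop n')).getD i' [] = v ++ row.drop n' := by
        simp only [hii]
        rw [List.getD_eq_getElem _ _ (by rw [List.length_set]; omega), List.getElem_set_self]
      rw [hx, hRget j]
      split_ifs with h1 h2 h2 <;> first | rfl | tauto | (rw [hii, hrowg])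
    · by_cases hkl : i' < g.length
      · have hx : (g.set i (v ++ row.drop n')).getD i' [] = g.getD i' [] := by
          rw [List.getD_eq_getElem _ _ (by rw [List.length_set]; omega),
            List.getElem_set_ne (fun h => hii h.symm), List.getD_eq_getElem _ _ hkl]
        rw [hx, if_neg (by tauto)]
      · have hx : (g.set i (v ++ row.drop n')).getD i' [] = ([] : List Int) :=
          List.getD_eq_default _ _ (by rw [List.length_set]; omega)
        have hy : g.getD i' [] = ([] : List Int) := List.getD_eq_default _ _ (by omega)
        rw [hx, hy, if_neg (by tauto)]

lemma alt_eq (field : List (List Int)) (N Q : Int) :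
    tornado_alt field N Q = (List.range (2 ^ (N - Q).toNat * 2 ^ Q.toNat)).foldl
      (fun fld (i : Nat) => setRowPrefix fld (i : Int)
        ((2 ^ (N - Q).toNat * 2 ^ Q.toNat : Nat) : Int)
        (((List.range (2 ^ (N - Q).toNat * 2 ^ Q.toNat)).map (fun i =>
          (List.range (2 ^ (N - Q).toNat * 2 ^ Q.toNat)).map (fun j =>
            rotC field (2 ^ Q.toNat) i j))).getD i [])) field := by
  have hs : 0 < 2 ^ Q.toNat := pow_pos (by norm_num) _
  have e : ((2 : Int) ^ (N - Q).toNat * (2 : Int) ^ Q.toNat)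
      = ((2 ^ (N - Q).toNat * 2 ^ Q.toNat : Nat) : Int) := by push_cast; ring
  have e6 : ((2 : Int) ^ Q.toNat) = ((2 ^ Q.toNat : Nat) : Int) := by push_cast; ring
  have esub : ∀ j : Nat, ((2 ^ Q.toNat : Nat) : Int) - 1 - ((j % 2 ^ Q.toNat : Nat) : Int)
      = ((2 ^ Q.toNat - 1 - j % 2 ^ Q.toNat : Nat) : Int) := by
    intro j
    have := Nat.mod_lt j hs
    omega
  simp only [tornado_alt, e]
  simp only [e6, PySem.List.pyRange_zero_nat, List.foldl_map, List.map_map,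
    Function.comp_def, PySem.Int.floordiv_natCast, PySem.Int.mod_natCast, esub,
    ← Nat.cast_mul, ← Nat.cast_add, PySem.List.pyGetD_natCast, rotC, matG]

lemma alt_fold (field res : List (List Int)) (n : Nat)
    (hrl : ∀ i, i < n → (res.getD i []).length = n)
    (hnL : n ≤ field.length) (hrowf : ∀ k, k < n → n ≤ (field.getD k []).length) :
    ∀ (k : Nat), k ≤ n →
      SameShape ((List.range k).foldl (fun fld (i : Nat) =>
        setRowPrefix fld (i : Int) ((n : Nat) : Int) (res.getD i [])) field) field ∧
      ∀ i j,
        matG ((List.range k).foldl (fun fld (i : Nat) =>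
          setRowPrefix fld (i : Int) ((n : Nat) : Int) (res.getD i [])) field) i j =
          if i < k ∧ j < n then matG res i j else matG field i j := by
  intro k
  induction k with
  | zero =>
    refine fun _ => ⟨SameShape_refl field, ?_⟩
    intro i j
    rw [if_neg (by omega)]
    rfl
  | succ k ih =>
    intro hk
    rw [List.range_succ, List.foldl_append, List.foldl_cons, List.foldl_nil]
    obtain ⟨ihs, ihm⟩ := ih (by omega)
    obtain ⟨sps, spm⟩ := setRowPrefix_spec _ k n (res.getD k [])
      (by rw [ihs.1]; omega) (hrl k (by omega)) (by rw [ihs.2 k]; exact hrowf k (by omega))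
    refine ⟨SameShape_trans sps ihs, ?_⟩
    intro i j
    rw [spm i j]
    by_cases hib : i = k ∧ j < n
    · obtain ⟨hieq, hjn⟩ := hib
      rw [if_pos ⟨hieq, hjn⟩, if_pos (by omega), hieq]
      rfl
    · rw [if_neg hib, ihm i j]
      by_cases hold : i < k ∧ j < n
      · rw [if_pos hold, if_pos (by omega)]
      · rw [if_neg hold, if_neg (by omega)]

lemma alt_spec (field : List (List Int)) (N Q : Int)
    (hnL : 2 ^ (N - Q).toNat * 2 ^ Q.toNat ≤ field.length)
    (hrowf : ∀ k, k < 2 ^ (N - Q).toNat * 2 ^ Q.toNat →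
      2 ^ (N - Q).toNat * 2 ^ Q.toNat ≤ (field.getD k []).length) :
    SameShape (tornado_alt field N Q) field ∧
    ∀ i j,
      matG (tornado_alt field N Q) i j =
        if i < 2 ^ (N - Q).toNat * 2 ^ Q.toNat ∧ j < 2 ^ (N - Q).toNat * 2 ^ Q.toNat
          then rotC field (2 ^ Q.toNat) i j else matG field i j := by
  have hrl : ∀ i, i < 2 ^ (N - Q).toNat * 2 ^ Q.toNat →
      (((List.range (2 ^ (N - Q).toNat * 2 ^ Q.toNat)).map (fun i =>
        (List.range (2 ^ (N - Q).toNat * 2 ^ Q.toNat)).map (fun j =>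
          rotC field (2 ^ Q.toNat) i j))).getD i []).length
        = 2 ^ (N - Q).toNat * 2 ^ Q.toNat := by
    intro i hi
    rw [getD_map_range _ _ _ i hi, List.length_map, List.length_range]
  have hfold := alt_fold field ((List.range (2 ^ (N - Q).toNat * 2 ^ Q.toNat)).map (fun i =>
      (List.range (2 ^ (N - Q).toNat * 2 ^ Q.toNat)).map (fun j =>
        rotC field (2 ^ Q.toNat) i j))) (2 ^ (N - Q).toNat * 2 ^ Q.toNat)
    hrl hnL hrowf (2 ^ (N - Q).toNat * 2 ^ Q.toNat) le_rfl
  rw [alt_eq]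
  refine ⟨hfold.1, ?_⟩
  intro i j
  rw [hfold.2 i j]
  by_cases hc : i < 2 ^ (N - Q).toNat * 2 ^ Q.toNat ∧ j < 2 ^ (N - Q).toNat * 2 ^ Q.toNat
  · rw [if_pos hc, if_pos hc]
    unfold matG
    rw [getD_map_range _ _ _ i hc.1, getD_map_range _ _ _ j hc.2]
  · rw [if_neg hc, if_neg hc]

lemma eq_of_matG (g1 g2 : List (List Int)) (hsh : SameShape g1 g2)
    (h : ∀ i j, matG g1 i j = matG g2 i j) : g1 = g2 := by
  obtain ⟨hl, hr⟩ := hsh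
  apply List.ext_getElem (by omega)
  intro i hi1 hi2
  have e1 : g1.getD i [] = g1[i] := List.getD_eq_getElem _ _ hi1
  have e2 : g2.getD i [] = g2[i] := List.getD_eq_getElem _ _ hi2
  have hrl : g1[i].length = g2[i].length := by
    have := hr i
    rwa [e1, e2] at this
  apply List.ext_getElem hrl
  intro j hj1 hj2
  have hval := h i j
  unfold matG at hval
  rw [e1, e2, List.getD_eq_getElem _ _ hj1, List.getD_eq_getElem _ _ hj2] at hval
  exact hval

-- ===== VERDICT (by name: the statement is the Claim_ definition above) =====
theorem tornado_spec : Claim_equal_tornado := by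
  intro field N Q hDom hPre
  obtain ⟨hQ0, hQN, hne, hlog, hrows⟩ := hPre
  unfold Spec_tornado
  have hs : 0 < 2 ^ Q.toNat := pow_pos (by norm_num) _
  have hL0 : field.length ≠ 0 := by
    intro h
    exact hne (List.eq_nil_of_length_eq_zero h)
  have hpow : 2 ^ N.toNat ≤ field.length :=
    ((Nat.le_log_iff_pow_le (by norm_num) hL0).mp hlog)
  have hmin : min N.toNat (Nat.log 2 field.length) = N.toNat := min_eq_left hlog
  have hnn : 2 ^ (N - Q).toNat * 2 ^ Q.toNat = 2 ^ N.toNat := by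
    rw [← pow_add]
    congr 1
    omega
  have hnL : 2 ^ (N - Q).toNat * 2 ^ Q.toNat ≤ field.length := by rw [hnn]; exact hpow
  have hrowf : ∀ k, k < 2 ^ (N - Q).toNat * 2 ^ Q.toNat →
      2 ^ (N - Q).toNat * 2 ^ Q.toNat ≤ (field.getD k []).length := by
    intro k hk
    rw [hnn] at hk ⊢
    have hkL : k < field.length := by omega
    have hkt : k < (field.take (2 ^ min N.toNat (Nat.log 2 field.length))).length := by
      rw [List.length_take, hmin]
      omega
    have hmem : field.getD k [] ∈ field.take (2 ^ min N.toNat (Nat.log 2 field.length)) := by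
      have hel : (field.take (2 ^ min N.toNat (Nat.log 2 field.length)))[k] = field[k] :=
        List.getElem_take
      rw [List.getD_eq_getElem _ _ hkL, ← hel]
      exact List.getElem_mem hkt
    obtain ⟨hne', hlog'⟩ := hrows _ hmem
    have hrow0 : (field.getD k []).length ≠ 0 := by
      intro h
      exact hne' (List.eq_nil_of_length_eq_zero h)
    exact (Nat.le_log_iff_pow_le (by norm_num) hrow0).mp hlog'
  have hinv0 : InvQ field field (2 ^ (N - Q).toNat * 2 ^ Q.toNat) (2 ^ Q.toNat) 0 0 := by
    refine ⟨SameShape_refl field, ?_⟩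
    intro i j
    simp
  have houter := outer_fold field (2 ^ (N - Q).toNat * 2 ^ Q.toNat) (2 ^ Q.toNat)
    (2 ^ (N - Q).toNat) hs rfl hnL hrowf (2 ^ (N - Q).toNat) le_rfl field hinv0
  obtain ⟨hshA, hmatA⟩ := houter
  obtain ⟨hshB, hmatB⟩ := alt_spec field N Q hnL hrowf
  rw [tornado_eq]
  apply eq_of_matG _ _ (SameShape_trans hshA (SameShape_symm hshB))
  intro i j
  rw [hmatA i j, hmatB i j]
  by_cases hc : i < 2 ^ (N - Q).toNat * 2 ^ Q.toNat ∧ j < 2 ^ (N - Q).toNat * 2 ^ Q.toNat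
  · rw [if_pos (by omega), if_pos hc]
  · rw [if_neg (by omega), if_neg hc]
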